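-- pv_equiv track=rewrite | github.com/iamadog3333/gfcn | fun_decompose_graph_central_rectangle.py | gen_two_idx
-- ===== SOURCE A (Python) =====
-- def gen_two_idx(used_path_idx_set, start, lens):
--     # generat i j. start <= i < j < len , not in the set. if not find, one of ij will be -1
--     i = -1
--     j = -1
--     for idx in range(start, lens):
--         if idx not in used_path_idx_set:
--             i = idx
--     for idx in range(i+1, lens):
--         if idx not in used_path_idx_set:
--             j = idx
--     return i, j
-- ===== SOURCE B (Python) =====
-- def gen_two_idx(used_path_idx_set, start, lens):
--     # generat i j. start <= i < j < len , not in the set. if not find, one of ij will be -1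
--     i = -1
--     for idx in range(lens - 1, start - 1, -1):
--         if idx not in used_path_idx_set:
--             i = idx
--             break
--     j = -1
--     for idx in range(lens - 1, i, -1):
--         if idx not in used_path_idx_set:
--             j = idx
--             break
--     return i, j
-- ===== Notes on version B (the rewrite author's own statement) =====
-- stated objective: alternative
-- what changed: Both forward last-match-overwrite scans are replaced by backward first-match searches with early break (i: from lens-1 down to start; j: from lens-1 down to i+1), so the loops stop at the first free index instead of traversing the whole range.
import Mathlib
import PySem

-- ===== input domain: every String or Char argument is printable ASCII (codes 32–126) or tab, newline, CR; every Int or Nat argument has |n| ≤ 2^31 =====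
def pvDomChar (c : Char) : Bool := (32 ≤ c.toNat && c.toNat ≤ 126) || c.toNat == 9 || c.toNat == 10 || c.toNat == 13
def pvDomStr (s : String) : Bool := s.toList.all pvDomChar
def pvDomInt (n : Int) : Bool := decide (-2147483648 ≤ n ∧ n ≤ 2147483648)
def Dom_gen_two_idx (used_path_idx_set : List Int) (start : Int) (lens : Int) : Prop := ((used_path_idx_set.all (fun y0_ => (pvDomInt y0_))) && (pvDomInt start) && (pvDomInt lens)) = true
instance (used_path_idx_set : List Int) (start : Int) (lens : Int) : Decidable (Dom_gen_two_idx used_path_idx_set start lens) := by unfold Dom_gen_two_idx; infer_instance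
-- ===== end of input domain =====

-- B replaces A's two forward last-match-overwrite scans by backward first-match searches with
-- early break (objective: alternative decomposition; return value proved identical).

-- ===== PORT A =====
-- two forward scans, each overwriting the accumulator at every free index
def gen_two_idx (used_path_idx_set : List Int) (start : Int) (lens : Int) : Int × Int :=
  let i := (PySem.List.pyRange start lens 1).foldl
    (fun i idx => if !(used_path_idx_set.contains idx) then idx else i) (-1)
  let j := (PySem.List.pyRange (i + 1) lens 1).foldl
    (fun j idx => if !(used_path_idx_set.contains idx) then idx else j) (-1)
  (i, j)

-- ===== PORT B =====
-- backward scan with early break: first free index in the list, else the default acc (-1)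
def findFreeBreak (used_path_idx_set : List Int) (acc : Int) : List Int → Int
  | [] => acc
  | idx :: rest =>
    if !(used_path_idx_set.contains idx) then idx else findFreeBreak used_path_idx_set acc rest

def gen_two_idx_alt (used_path_idx_set : List Int) (start : Int) (lens : Int) : Int × Int :=
  let i := findFreeBreak used_path_idx_set (-1) (PySem.List.pyRange (lens - 1) (start - 1) (-1))
  let j := findFreeBreak used_path_idx_set (-1) (PySem.List.pyRange (lens - 1) i (-1))
  (i, j)

-- ===== PRECONDITION & SPEC =====
def Spec_gen_two_idx (used_path_idx_set : List Int) (start : Int) (lens : Int) (out : Int × Int) : Prop := out = gen_two_idx_alt used_path_idx_set start lens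
instance (used_path_idx_set : List Int) (start : Int) (lens : Int) (out : Int × Int) : Decidable (Spec_gen_two_idx used_path_idx_set start lens out) := by unfold Spec_gen_two_idx; infer_instance

-- ===== CLAIM (what is proved, stated in full; the proofs are below) =====
def Claim_equal_gen_two_idx : Prop := ∀ (used_path_idx_set : List Int) (start : Int) (lens : Int), Dom_gen_two_idx used_path_idx_set start lens → Spec_gen_two_idx used_path_idx_set start lens (gen_two_idx used_path_idx_set start lens)

-- ===== LEMMAS AND PROOFS =====

theorem findFreeBreak_append_singleton (s : List Int) (acc x : Int) (l : List Int) :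
    findFreeBreak s acc (l ++ [x]) =
      findFreeBreak s (if !(s.contains x) then x else acc) l := by
  induction l with
  | nil => simp [findFreeBreak]
  | cons y ys ih => simp [findFreeBreak, ih]

theorem foldl_last_eq_findFreeBreak_reverse (s : List Int) (l : List Int) (acc : Int) :
    l.foldl (fun a idx => if !(s.contains idx) then idx else a) acc =
      findFreeBreak s acc l.reverse := by
  induction l generalizing acc with
  | nil => simp [findFreeBreak]
  | cons x xs ih =>
    simp only [List.foldl_cons, List.reverse_cons, findFreeBreak_append_singleton]
    exact ih _

theorem scan_eq (s : List Int) (a b : Int) :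
    (PySem.List.pyRange a b 1).foldl
        (fun i idx => if !(s.contains idx) then idx else i) (-1) =
      findFreeBreak s (-1) (PySem.List.pyRange (b - 1) (a - 1) (-1)) := by
  rw [PySem.List.pyRange_neg_one_eq_reverse]
  have : a - 1 + 1 = a := by ring
  rw [this]
  have : b - 1 + 1 = b := by ring
  rw [this]
  exact foldl_last_eq_findFreeBreak_reverse s _ (-1)

-- ===== VERDICT (by name: the statement is the Claim_ definition above) =====
theorem gen_two_idx_spec : Claim_equal_gen_two_idx := by
  intro s start lens _
  unfold Spec_gen_two_idx gen_two_idx gen_two_idx_alt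
  rw [scan_eq s start lens]
  have h := scan_eq s
    (findFreeBreak s (-1) (PySem.List.pyRange (lens - 1) (start - 1) (-1)) + 1) lens
  simp only [add_sub_cancel_right] at h
  exact congrArg (Prod.mk _) h
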